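-- pv_equiv track=rewrite | github.com/FerencDenes/AdventOfCode2021 | 2301.py | pitFree
-- ===== SOURCE A (Python) =====
-- pitval = {1:1,10:2,100:3,1000:4}
--
-- def pitFree(state,a):
--   pit = pitval[a]
--   pi=-1
--   for p in state[pit]:
--     if p!=0 and p!=a:
--       return -1
--     if p==0:
--       pi+=1
--   return pi
-- ===== SOURCE B (Python) =====
-- pitval = {1:1,10:2,100:3,1000:4}
--
-- def pitFree(state, a):
--   pit = pitval[a]
--   cnt = {}
--   for p in state[pit]:
--     cnt[p] = cnt.get(p, 0) + 1
--   if set(cnt) <= {0, a}: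
--     return cnt.get(0, 0) - 1
--   return -1
-- ===== Notes on version B (the rewrite author's own statement) =====
-- stated objective: alternative
-- what changed: Replaces A's early-return validation loop with an int accumulator by building a histogram dict of the column once, then deciding the answer from the histogram: -1 unless its key set is within {0, a}, otherwise the zero-count minus one.
import Mathlib
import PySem

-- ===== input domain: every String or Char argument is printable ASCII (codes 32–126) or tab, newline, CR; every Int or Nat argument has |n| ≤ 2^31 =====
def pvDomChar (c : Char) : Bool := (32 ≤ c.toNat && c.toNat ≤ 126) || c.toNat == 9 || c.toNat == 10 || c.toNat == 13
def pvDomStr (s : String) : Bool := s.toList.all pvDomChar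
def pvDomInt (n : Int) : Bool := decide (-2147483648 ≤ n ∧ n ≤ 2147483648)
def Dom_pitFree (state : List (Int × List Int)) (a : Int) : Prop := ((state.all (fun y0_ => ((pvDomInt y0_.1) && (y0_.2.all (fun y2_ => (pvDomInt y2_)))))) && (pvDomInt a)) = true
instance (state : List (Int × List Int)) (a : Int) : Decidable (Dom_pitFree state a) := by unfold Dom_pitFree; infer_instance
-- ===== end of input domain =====

-- B replaces A's fused early-return loop (accumulator pi) by building a histogram
-- dict of the column once and reading the answer off it: -1 unless the key set is
-- within {0, a}, otherwise the zero-count minus one.  Same asymptotic cost.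

-- the module constant pitval = {1:1,10:2,100:3,1000:4}, shared by both ports
def pvPitval : PySem.Dict Int Int := PySem.Dict.ofList [(1,1),(10,2),(100,3),(1000,4)]

-- ===== PORT A =====
-- the for-loop of A: early 'return -1', else pi += 1 when p == 0
def pitFreeLoop (a : Int) : List Int → Int → Int
  | [], pi => pi
  | p :: rest, pi =>
    if p ≠ 0 ∧ p ≠ a then -1
    else pitFreeLoop a rest (if p = 0 then pi + 1 else pi)

def pitFree (state : List (Int × List Int)) (a : Int) : Int :=
  match pvPitval.get? a with
  | none => 0   -- KeyError in Python; excluded by Pre_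
  | some pit =>
    match (PySem.Dict.mk state).get? pit with
    | none => 0   -- KeyError in Python; excluded by Pre_
    | some col => pitFreeLoop a col (-1)

-- ===== PORT B =====
def pitFree_alt (state : List (Int × List Int)) (a : Int) : Int :=
  match pvPitval.get? a with
  | none => 0   -- KeyError in Python; excluded by Pre_
  | some pit =>
    match (PySem.Dict.mk state).get? pit with
    | none => 0   -- KeyError in Python; excluded by Pre_
    | some col =>
      -- the histogram loop: cnt[p] = cnt.get(p, 0) + 1
      let cnt : PySem.Dict Int Int :=
        col.foldl (fun d p => d.insert p (d.getD p 0 + 1)) PySem.Dict.empty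
      if PySem.Set.issubset (PySem.Set.ofList cnt.keys) (PySem.Set.ofList [0, a]) then
        cnt.getD 0 0 - 1
      else -1

-- ===== PRECONDITION & SPEC =====
-- Pre_ excludes exactly the KeyErrors: a must be a key of pitval and pitval[a] a key of state.
def Pre_pitFree (state : List (Int × List Int)) (a : Int) : Prop :=
  (a = 1 ∧ (1 : Int) ∈ state.map Prod.fst) ∨ (a = 10 ∧ (2 : Int) ∈ state.map Prod.fst) ∨
  (a = 100 ∧ (3 : Int) ∈ state.map Prod.fst) ∨ (a = 1000 ∧ (4 : Int) ∈ state.map Prod.fst)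
instance (state : List (Int × List Int)) (a : Int) : Decidable (Pre_pitFree state a) := by
  unfold Pre_pitFree; infer_instance

def pvWitness_pitFree : (List (Int × List Int)) × Int := ([(1, [0, 0, 1])], 1)

def Spec_pitFree (state : List (Int × List Int)) (a : Int) (out : Int) : Prop := out = pitFree_alt state a
instance (state : List (Int × List Int)) (a : Int) (out : Int) : Decidable (Spec_pitFree state a out) := by unfold Spec_pitFree; infer_instance

-- ===== CLAIM (what is proved, stated in full; the proofs are below) =====
def Claim_equal_pitFree : Prop := ∀ (state : List (Int × List Int)) (a : Int), Dom_pitFree state a → Pre_pitFree state a → Spec_pitFree state a (pitFree state a)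

-- ===== LEMMAS AND PROOFS =====
-- A's loop computes -1 on an invalid column, else start + number of zeros
lemma pitFreeLoop_eq (a : Int) (col : List Int) : ∀ pi : Int,
    pitFreeLoop a col pi =
      if col.all (fun p => p == 0 || p == a) then pi + (col.count 0 : Int) else -1 := by
  induction col with
  | nil => intro pi; simp [pitFreeLoop]
  | cons p rest ih =>
    intro pi
    simp only [pitFreeLoop, List.all_cons]
    by_cases h0 : p = 0
    · subst h0
      simp [ih]
      split <;> omega
    · by_cases ha : p = a
      · subst ha
        simp [h0, ih]
      · simp [h0, ha]

-- B's subset test over the histogram's keys is A's per-element validity check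
lemma keys_subset_iff_all (a : Int) (col : List Int) :
    PySem.Set.issubset (PySem.Set.ofList (PySem.Dict.counter col).keys) (PySem.Set.ofList [0, a]) = true ↔
      col.all (fun p => p == 0 || p == a) = true := by
  rw [PySem.Set.issubset_iff]
  rw [PySem.Dict.keys_counter]
  simp only [PySem.Set.mem_ofList, List.all_eq_true]
  constructor
  · intro h p hp
    have := h p hp
    simp only [List.mem_cons, List.not_mem_nil, or_false] at this
    rcases this with h1 | h1 <;> simp [h1]
  · intro h x hx
    have := h x hx
    simp only [Bool.or_eq_true, beq_iff_eq] at this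
    rcases this with h1 | h1 <;> simp [h1]

-- a key present among the firsts has a get? value
lemma get?_isSome_of_mem_fst (state : List (Int × List Int)) (k : Int)
    (h : k ∈ state.map Prod.fst) : ∃ col, (PySem.Dict.mk state).get? k = some col := by
  induction state with
  | nil => simp at h
  | cons kv rest ih =>
    rw [PySem.Dict.get?_mk_cons]
    by_cases hk : kv.1 = k
    · simp [hk]
    · simp only [List.map_cons, List.mem_cons] at h
      rcases h with h | h
      · exact absurd h.symm hk
      · simpa [hk] using ih h

-- ===== VERDICT (by name: the statement is the Claim_ definition above) =====
theorem pitFree_spec : Claim_equal_pitFree := by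
  intro state a _ hpre
  unfold Spec_pitFree pitFree pitFree_alt
  have hval : ∃ pit, pvPitval.get? a = some pit ∧ pit ∈ state.map Prod.fst := by
    rcases hpre with ⟨rfl, h⟩ | ⟨rfl, h⟩ | ⟨rfl, h⟩ | ⟨rfl, h⟩
    · exact ⟨1, by decide, h⟩
    · exact ⟨2, by decide, h⟩
    · exact ⟨3, by decide, h⟩
    · exact ⟨4, by decide, h⟩
  rcases hval with ⟨pit, hpv, hmem⟩
  rcases get?_isSome_of_mem_fst state pit hmem with ⟨col, hcol⟩
  simp only [hpv, hcol, pitFreeLoop_eq]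
  rw [PySem.Dict.foldl_insert_getD_add_one_eq_counter]
  by_cases hall : col.all (fun p => p == 0 || p == a) = true
  · rw [if_pos hall, if_pos ((keys_subset_iff_all a col).mpr hall),
      PySem.Dict.getD_counter]
    omega
  · rw [if_neg hall, if_neg (by rw [keys_subset_iff_all]; exact hall)]
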